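-- pv_equiv track=rewrite | github.com/noemiefedon/foobar | foobar-2-1.py | solution
-- ===== SOURCE A (Python) =====
-- def solution(x, y):
--     "find the solution of the exercise 1 at level 2 of the foo.bar challenge"
--     value = 1
--
--     for ind_row in range(y):
--         value += ind_row
--
--     rate = y + 1
--
--     for ind_col in range(x - 1):
--         value += rate
--         rate += 1
--
--     return str(value)
-- ===== SOURCE B (Python) =====
-- def solution(x, y):
--     "find the solution of the exercise 1 at level 2 of the foo.bar challenge"
--     a = max(y, 0)
--     b = max(x - 1, 0)
--     return str(1 + a * (a - 1) // 2 + b * (y + 1) + b * (b - 1) // 2)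
-- ===== Notes on version B (the rewrite author's own statement) =====
-- stated objective: faster
-- what changed: Replaced the two counting loops by closed-form arithmetic-series formulas (triangular numbers), computing the result in O(1).
import Mathlib
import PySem

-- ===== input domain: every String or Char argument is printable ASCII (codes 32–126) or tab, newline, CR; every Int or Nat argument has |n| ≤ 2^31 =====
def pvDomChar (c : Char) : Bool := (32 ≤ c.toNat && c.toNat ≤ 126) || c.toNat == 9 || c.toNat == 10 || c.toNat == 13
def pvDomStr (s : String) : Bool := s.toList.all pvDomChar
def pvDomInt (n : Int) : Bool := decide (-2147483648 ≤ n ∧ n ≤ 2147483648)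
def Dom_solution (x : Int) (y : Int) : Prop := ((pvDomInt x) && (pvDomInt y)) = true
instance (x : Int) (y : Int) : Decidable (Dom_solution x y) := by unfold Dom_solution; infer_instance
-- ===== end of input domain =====

-- ===== PORT A =====
-- header: B replaces A's two counting loops by closed-form arithmetic-series formulas (O(1)).
def solution (x : Int) (y : Int) : String :=
  let value : Int := (PySem.List.pyRange 0 y 1).foldl (fun v i => v + i) 1
  let vr : Int × Int :=
    (PySem.List.pyRange 0 (x - 1) 1).foldl (fun vr _ => (vr.1 + vr.2, vr.2 + 1)) (value, y + 1)
  PySem.Int.toStr vr.1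

-- ===== PORT B =====
def solution_alt (x : Int) (y : Int) : String :=
  let a : Int := max y 0
  let b : Int := max (x - 1) 0
  PySem.Int.toStr (1 + PySem.Int.floordiv (a * (a - 1)) 2 + b * (y + 1) + PySem.Int.floordiv (b * (b - 1)) 2)

-- ===== PRECONDITION & SPEC =====
def Spec_solution (x : Int) (y : Int) (out : String) : Prop := out = solution_alt x y
instance (x : Int) (y : Int) (out : String) : Decidable (Spec_solution x y out) := by unfold Spec_solution; infer_instance

-- ===== CLAIM (what is proved, stated in full; the proofs are below) =====
def Claim_equal_solution : Prop := ∀ (x : Int) (y : Int), Dom_solution x y → Spec_solution x y (solution x y)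

-- ===== LEMMAS AND PROOFS =====

-- first loop: twice the fold over range(n) starting from init
lemma loop1_sum (n : Nat) (init : Int) :
    2 * ((PySem.List.pyRange 0 (n : Int) 1).foldl (fun v i => v + i) init)
      = 2 * init + (n : Int) * ((n : Int) - 1) := by
  induction n generalizing init with
  | zero => simp [PySem.List.pyRange_one_eq_nil]
  | succ k ih =>
    have h : PySem.List.pyRange 0 ((k : Int) + 1) 1
        = PySem.List.pyRange 0 (k : Int) 1 ++ [(k : Int)] :=
      PySem.List.pyRange_one_succ_right (by positivity)
    push_cast
    rw [h, List.foldl_append]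
    simp only [List.foldl]
    nlinarith [ih init]

-- second loop ignores the element, so only the length matters
lemma loop2_fst (l : List Int) (v r : Int) :
    2 * (l.foldl (fun (vr : Int × Int) _ => (vr.1 + vr.2, vr.2 + 1)) (v, r)).1
      = 2 * v + 2 * l.length * r + (l.length : Int) * ((l.length : Int) - 1) := by
  induction l generalizing v r with
  | nil => simp
  | cons a t ih =>
    simp only [List.foldl, List.length_cons]
    rw [ih]
    push_cast
    ring

lemma even_mul_pred (a : Int) : ∃ t : Int, a * (a - 1) = 2 * t := by
  rcases Int.even_mul_succ_self (a - 1) with ⟨t, ht⟩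
  exact ⟨t, by linarith [ht]⟩

-- ===== VERDICT (by name: the statement is the Claim_ definition above) =====
theorem solution_spec : Claim_equal_solution := by
  intro x y _
  unfold Spec_solution solution solution_alt
  simp only []
  congr 1
  -- abbreviations
  have hlen : ((PySem.List.pyRange 0 (x - 1) 1).length : Int) = max (x - 1) 0 := by
    rw [PySem.List.length_pyRange_one]
    omega
  -- first loop
  have key1 : 2 * ((PySem.List.pyRange 0 y 1).foldl (fun v i => v + i) 1)
      = 2 + max y 0 * (max y 0 - 1) := by
    by_cases hy : 0 ≤ y
    · have := loop1_sum y.toNat 1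
      rw [Int.toNat_of_nonneg hy] at this
      rw [this]
      have hm : max y 0 = y := by omega
      rw [hm]; ring
    · rw [PySem.List.pyRange_one_eq_nil (by omega)]
      have : max y 0 = 0 := by omega
      rw [this]; simp
  -- second loop
  have key2 := loop2_fst (PySem.List.pyRange 0 (x - 1) 1)
      ((PySem.List.pyRange 0 y 1).foldl (fun v i => v + i) 1) (y + 1)
  rw [hlen] at key2
  -- floordivs are exact
  obtain ⟨t1, h1⟩ := even_mul_pred (max y 0)
  obtain ⟨t2, h2⟩ := even_mul_pred (max (x - 1) 0)
  have f1 : PySem.Int.floordiv (max y 0 * (max y 0 - 1)) 2 = t1 := by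
    rw [PySem.Int.floordiv_eq_ediv_of_pos (by norm_num), h1,
      Int.mul_ediv_cancel_left _ (by norm_num)]
  have f2 : PySem.Int.floordiv (max (x - 1) 0 * (max (x - 1) 0 - 1)) 2 = t2 := by
    rw [PySem.Int.floordiv_eq_ediv_of_pos (by norm_num), h2,
      Int.mul_ediv_cancel_left _ (by norm_num)]
  rw [f1, f2]
  linarith [key1, key2, h1, h2]
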